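-- pv_equiv track=rewrite | github.com/MotleyAI/bird-interact-agents | scripts/kb_op_audit_summarize.py | _silent_aware_counts
-- ===== SOURCE A (Python) =====
-- from typing import Iterable
--
-- def _silent_aware_counts(rows: Iterable[dict]) -> tuple[int, int, int]:
--     """Return (n_total, n_aware, n_silent). ERROR verdicts go in n_total only."""
--     n_total = n_aware = n_silent = 0
--     for r in rows:
--         n_total += 1
--         v = r.get("verdict")
--         if v == "aware":
--             n_aware += 1
--         elif v == "silent":
--             n_silent += 1
--     return n_total, n_aware, n_silent
-- ===== SOURCE B (Python) =====
-- from typing import Iterable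
--
-- def _silent_aware_counts(rows: Iterable[dict]) -> tuple[int, int, int]:
--     """Return (n_total, n_aware, n_silent). ERROR verdicts go in n_total only."""
--     vs = [r.get("verdict") for r in rows]
--
--     def reduce(lo: int, hi: int) -> tuple[int, int, int]:
--         # divide-and-conquer tuple-monoid reduction over vs[lo:hi]
--         if hi - lo == 0:
--             return (0, 0, 0)
--         if hi - lo == 1:
--             v = vs[lo]
--             return (1, int(v == "aware"), int(v == "silent"))
--         mid = (lo + hi) // 2
--         t1, a1, s1 = reduce(lo, mid)
--         t2, a2, s2 = reduce(mid, hi)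
--         return (t1 + t2, a1 + a2, s1 + s2)
--
--     return reduce(0, len(vs))
-- ===== Notes on version B (the rewrite author's own statement) =====
-- stated objective: alternative
-- what changed: Replaces the single-pass if/elif accumulator with a divide-and-conquer reduction: verdicts are materialized once, then the (total, aware, silent) triple is computed by recursively splitting the range in halves and adding the sub-triples componentwise, with branch-free bool-as-int leaves.
import Mathlib
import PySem

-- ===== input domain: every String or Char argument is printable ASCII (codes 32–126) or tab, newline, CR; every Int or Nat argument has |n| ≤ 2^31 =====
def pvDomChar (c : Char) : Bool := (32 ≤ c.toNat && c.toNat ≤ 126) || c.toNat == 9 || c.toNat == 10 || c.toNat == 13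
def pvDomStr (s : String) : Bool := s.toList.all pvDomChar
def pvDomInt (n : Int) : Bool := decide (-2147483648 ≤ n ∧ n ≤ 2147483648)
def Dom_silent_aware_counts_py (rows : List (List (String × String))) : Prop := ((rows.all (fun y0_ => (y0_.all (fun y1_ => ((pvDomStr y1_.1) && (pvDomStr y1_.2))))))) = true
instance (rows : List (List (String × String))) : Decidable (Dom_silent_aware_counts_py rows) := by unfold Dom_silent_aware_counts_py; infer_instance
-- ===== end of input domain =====

-- B replaces A's single-pass if/elif accumulator with a divide-and-conquer reduction
-- over the materialized verdict list (alternative decomposition, same cost class).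

-- ===== PORT A =====
def silent_aware_counts_py (rows : List (List (String × String))) : Int × Int × Int :=
  rows.foldl (fun (st : Int × Int × Int) r =>
    let t := st.1 + 1
    let v := (PySem.Dict.mk r).get? "verdict"
    if v = some "aware" then (t, st.2.1 + 1, st.2.2)
    else if v = some "silent" then (t, st.2.1, st.2.2 + 1)
    else (t, st.2.1, st.2.2)) (0, 0, 0)

-- ===== PORT B =====
-- Source B's `reduce(lo, hi)` works on the half-open range vs[lo:hi]; its Lean
-- transcription recurses on that sublist directly, splitting at the midpoint.
def sawReduce (vs : List (Option String)) : Int × Int × Int :=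
  match h : vs with
  | [] => (0, 0, 0)
  | [v] => (1, if v = some "aware" then 1 else 0, if v = some "silent" then 1 else 0)
  | v₁ :: v₂ :: rest =>
      let mid := (v₁ :: v₂ :: rest).length / 2
      let l := sawReduce ((v₁ :: v₂ :: rest).take mid)
      let r := sawReduce ((v₁ :: v₂ :: rest).drop mid)
      (l.1 + r.1, l.2.1 + r.2.1, l.2.2 + r.2.2)
termination_by vs.length
decreasing_by
  · simp [List.length_take]; omega
  · simp; omega

def silent_aware_counts_py_alt (rows : List (List (String × String))) : Int × Int × Int :=
  sawReduce (rows.map (fun r => (PySem.Dict.mk r).get? "verdict"))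

-- ===== PRECONDITION & SPEC =====
def Spec_silent_aware_counts_py (rows : List (List (String × String))) (out : Int × Int × Int) : Prop := out = silent_aware_counts_py_alt rows
instance (rows : List (List (String × String))) (out : Int × Int × Int) : Decidable (Spec_silent_aware_counts_py rows out) := by unfold Spec_silent_aware_counts_py; infer_instance

-- ===== CLAIM (what is proved, stated in full; the proofs are below) =====
def Claim_equal_silent_aware_counts_py : Prop := ∀ (rows : List (List (String × String))), Dom_silent_aware_counts_py rows → Spec_silent_aware_counts_py rows (silent_aware_counts_py rows)

-- ===== LEMMAS AND PROOFS =====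

theorem sawReduce_eq (vs : List (Option String)) :
    sawReduce vs = ((vs.length : Int),
      ((vs.count (some "aware") : Nat) : Int),
      ((vs.count (some "silent") : Nat) : Int)) := by
  induction vs using sawReduce.induct with
  | case1 => simp [sawReduce]
  | case2 v =>
    by_cases h1 : v = some "aware" <;> by_cases h2 : v = some "silent" <;>
      simp_all [sawReduce]
  | case3 v₁ v₂ rest mid ih1 ih2 =>
    have hsplit := List.take_append_drop mid (v₁ :: v₂ :: rest)
    have hlen := congrArg List.length hsplit
    have ha := congrArg (List.count (some "aware")) hsplit
    have hs := congrArg (List.count (some "silent")) hsplit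
    simp only [List.length_append, List.count_append] at hlen ha hs
    rw [sawReduce]
    have hm : mid = (v₁ :: v₂ :: rest).length / 2 := rfl
    rw [hm] at ih1 ih2 hlen ha hs
    simp only [ih1, ih2, Prod.ext_iff]
    refine ⟨?_, ?_, ?_⟩ <;> omega

theorem saw_fold (rows : List (List (String × String))) (t a c : Int) :
    rows.foldl (fun (st : Int × Int × Int) r =>
      let t := st.1 + 1
      let v := (PySem.Dict.mk r).get? "verdict"
      if v = some "aware" then (t, st.2.1 + 1, st.2.2)
      else if v = some "silent" then (t, st.2.1, st.2.2 + 1)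
      else (t, st.2.1, st.2.2)) (t, a, c)
    = (t + rows.length,
       a + ((rows.map (fun r => (PySem.Dict.mk r).get? "verdict")).count (some "aware") : Int),
       c + ((rows.map (fun r => (PySem.Dict.mk r).get? "verdict")).count (some "silent") : Int)) := by
  induction rows generalizing t a c with
  | nil => simp
  | cons r rs ih =>
    simp only [List.foldl_cons, List.map_cons, List.length_cons]
    by_cases h1 : (PySem.Dict.mk r).get? "verdict" = some "aware"
    · simp [h1, ih]; omega
    · by_cases h2 : (PySem.Dict.mk r).get? "verdict" = some "silent"
      · simp [h2, ih]; omega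
      · simp [h1, h2, ih]; omega

-- ===== VERDICT (by name: the statement is the Claim_ definition above) =====
theorem silent_aware_counts_py_spec : Claim_equal_silent_aware_counts_py := by
  intro rows _
  show _ = _
  simp [silent_aware_counts_py, silent_aware_counts_py_alt, saw_fold, sawReduce_eq]
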